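-- pv_equiv track=rewrite | github.com/PaulBatchelor/Recurse | leetcode/1679/ksum.py | ksum_hash_1pass
-- ===== SOURCE A (Python) =====
-- def ksum_hash_1pass(nums, k):
--     hmap = {}
--     npairs = 0
--     for i in nums:
--         comp = k - i
--         if comp in hmap:
--             hmap[comp] -= 1
--             if hmap[comp] <= 0:
--                 hmap.pop(comp)
--             npairs += 1
--         else:
--             if i in hmap:
--                 hmap[i] += 1
--             else:
--                 hmap[i] = 1
--
--     return npairs
-- ===== SOURCE B (Python) =====
-- def ksum_hash_1pass(nums, k):
--     counts = {}
--     for x in nums: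
--         counts[x] = counts.get(x, 0) + 1
--     npairs = 0
--     for v, c in counts.items():
--         if 2 * v == k:
--             npairs += c // 2
--         elif 2 * v < k:
--             npairs += min(c, counts.get(k - v, 0))
--     return npairs
-- ===== Notes on version B (the rewrite author's own statement) =====
-- stated objective: alternative
-- what changed: Replaces A's online greedy pass (a dict of unmatched elements, matching each arrival against its complement) with a frequency Counter built once followed by a closed-form per-value computation: min(count[v], count[k-v]) for each value pair with 2v<k, plus count[k/2]//2 for the middle value.
import Mathlib
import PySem

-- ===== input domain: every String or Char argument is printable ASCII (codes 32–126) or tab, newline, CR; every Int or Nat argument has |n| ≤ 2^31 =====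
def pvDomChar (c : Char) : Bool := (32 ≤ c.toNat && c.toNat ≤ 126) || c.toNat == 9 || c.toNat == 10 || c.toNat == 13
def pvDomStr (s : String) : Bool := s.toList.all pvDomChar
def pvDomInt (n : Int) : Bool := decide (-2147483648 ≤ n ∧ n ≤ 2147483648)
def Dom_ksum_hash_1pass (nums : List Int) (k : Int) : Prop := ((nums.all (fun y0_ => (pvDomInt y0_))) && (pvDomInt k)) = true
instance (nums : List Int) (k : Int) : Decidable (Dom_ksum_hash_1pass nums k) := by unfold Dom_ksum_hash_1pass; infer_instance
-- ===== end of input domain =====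

-- B replaces A's online greedy hash pass by a frequency counter plus a closed-form
-- per-value-pair count (objective: alternative decomposition, same asymptotic cost).

-- ===== PORT A =====
-- the for-loop of A: state = (hmap, npairs)
def ksumLoopA (k : Int) : List Int → PySem.Dict Int Int → Int → Int
  | [], _, npairs => npairs
  | i :: rest, hmap, npairs =>
    let comp := k - i
    if hmap.contains comp then
      let h1 := hmap.modify comp 0 (fun x => x - 1)
      let h2 := if h1.getD comp 0 ≤ 0 then h1.erase comp else h1
      ksumLoopA k rest h2 (npairs + 1)
    else
      if hmap.contains i then
        ksumLoopA k rest (hmap.modify i 0 (fun x => x + 1)) npairs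
      else
        ksumLoopA k rest (hmap.insert i 1) npairs

def ksum_hash_1pass (nums : List Int) (k : Int) : Int :=
  ksumLoopA k nums PySem.Dict.empty 0

-- ===== PORT B =====
def ksum_hash_1pass_alt (nums : List Int) (k : Int) : Int :=
  let counts := nums.foldl (fun d x => d.insert x (d.getD x 0 + 1)) PySem.Dict.empty
  counts.items.foldl
    (fun npairs vc =>
      if 2 * vc.1 = k then npairs + PySem.Int.floordiv vc.2 2
      else if 2 * vc.1 < k then npairs + min vc.2 (counts.getD (k - vc.1) 0)
      else npairs) 0

-- ===== PRECONDITION & SPEC =====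
def Spec_ksum_hash_1pass (nums : List Int) (k : Int) (out : Int) : Prop := out = ksum_hash_1pass_alt nums k
instance (nums : List Int) (k : Int) (out : Int) : Decidable (Spec_ksum_hash_1pass nums k out) := by unfold Spec_ksum_hash_1pass; infer_instance

-- ===== CLAIM (what is proved, stated in full; the proofs are below) =====
def Claim_equal_ksum_hash_1pass : Prop := ∀ (nums : List Int) (k : Int), Dom_ksum_hash_1pass nums k → Spec_ksum_hash_1pass nums k (ksum_hash_1pass nums k)

-- ===== LEMMAS AND PROOFS =====

-- number of unmatched occurrences of value v after A has processed the prefix l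
def kpred (k : Int) (l : List Int) (v : Int) : Nat :=
  if v + v = k then (l.count v) % 2 else l.count v - l.count (k - v)

-- the invariant tying A's hash map to the prefix processed so far
def kInv (k : Int) (l : List Int) (d : PySem.Dict Int Int) : Prop :=
  ∀ v : Int, d.get? v = if kpred k l v = 0 then none else some ((kpred k l v : Nat) : Int)

-- number of matches A records while processing the second list, after the first
def kF (k : Int) : List Int → List Int → Int
  | _, [] => 0
  | pref, i :: rest => (if kpred k pref (k - i) ≠ 0 then 1 else 0) + kF k (pref ++ [i]) rest

-- total number of unmatched elements after processing l
def kS (k : Int) (l : List Int) : Int := ∑ v ∈ l.toFinset, ((kpred k l v : Nat) : Int)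

theorem kfind_filter (a b : Int) (items : List (Int × Int)) :
    List.find? (fun q => q.1 == b) (List.filter (fun q => !(q.1 == a)) items) =
    if b = a then none else List.find? (fun q => q.1 == b) items := by
  induction items with
  | nil => simp
  | cons p rest ih =>
    rw [List.filter_cons]
    by_cases hpa : p.1 = a
    · have : (!(p.1 == a)) = false := by simp [hpa]
      rw [this, if_neg (by simp), ih]
      by_cases hba : b = a
      · simp [hba]
      · rw [if_neg hba, if_neg hba, List.find?_cons_of_neg]
        simp only [beq_iff_eq]
        intro h; exact hba (by omega)
    · have : (!(p.1 == a)) = true := by simp [hpa]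
      rw [this, if_pos rfl]
      by_cases hpb : p.1 = b
      · have hba : ¬ b = a := fun h => hpa (by omega)
        rw [if_neg hba, List.find?_cons_of_pos (by simp [hpb]), List.find?_cons_of_pos (by simp [hpb])]
      · rw [List.find?_cons_of_neg (by simp [hpb]), ih]
        by_cases hba : b = a
        · simp [hba]
        · rw [if_neg hba, if_neg hba, List.find?_cons_of_neg (by simp [hpb])]
theorem kget?_erase (d : PySem.Dict Int Int) (a b : Int) :
    (d.erase a).get? b = if b = a then none else d.get? b := by
  obtain ⟨items⟩ := d
  show Option.map _ (List.find? _ (List.filter _ items)) = _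
  rw [kfind_filter]
  by_cases h : b = a <;> simp [h, PySem.Dict.get?]

theorem kpred_zero_of_not_mem (k : Int) (l : List Int) (v : Int) (h : v ∉ l) :
    kpred k l v = 0 := by
  have : l.count v = 0 := List.count_eq_zero.mpr h
  unfold kpred; split <;> omega

theorem kmem_of_kpred_ne_zero (k : Int) (l : List Int) (v : Int) (h : kpred k l v ≠ 0) :
    v ∈ l := by
  by_contra hc; exact h (kpred_zero_of_not_mem k l v hc)

theorem kcount_append_self (pref : List Int) (i : Int) :
    (pref ++ [i]).count i = pref.count i + 1 := by
  simp [List.count_append]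

theorem kcount_append_ne (pref : List Int) (i v : Int) (h : v ≠ i) :
    (pref ++ [i]).count v = pref.count v := by
  have hne : i ≠ v := fun hh => h hh.symm
  simp [List.count_append, hne]

theorem kpred_append_matched (k i : Int) (pref : List Int)
    (h : kpred k pref (k - i) ≠ 0) (v : Int) :
    kpred k (pref ++ [i]) v =
      if v = k - i then kpred k pref (k - i) - 1 else kpred k pref v := by
  by_cases hv : v = k - i
  · subst hv
    rw [if_pos rfl]
    by_cases hk : (k - i) + (k - i) = k
    · have hii : k - i = i := by omega
      simp only [kpred, if_pos hk] at h ⊢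
      rw [hii] at h ⊢
      rw [kcount_append_self]
      omega
    · have hii : k - i ≠ i := fun hh => hk (by omega)
      simp only [kpred, if_neg hk] at h ⊢
      rw [show k - (k - i) = i from by ring] at h ⊢
      rw [kcount_append_ne pref i _ hii, kcount_append_self]
      omega
  · rw [if_neg hv]
    by_cases hvi : v = i
    · subst hvi
      have hk : ¬ (v + v = k) := fun hh => hv (by omega)
      simp only [kpred, if_neg hk]
      rw [kcount_append_self, kcount_append_ne pref v _ (fun hh => hv (by omega))]
      have hk2 : ¬ ((k - v) + (k - v) = k) := fun hh => hv (by omega)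
      simp only [kpred, if_neg hk2] at h
      rw [show k - (k - v) = v from by ring] at h
      omega
    · simp only [kpred]
      rw [kcount_append_ne pref i v hvi, kcount_append_ne pref i (k - v) (fun hh => hv (by omega))]

theorem kpred_append_unmatched (k i : Int) (pref : List Int)
    (h : kpred k pref (k - i) = 0) (v : Int) :
    kpred k (pref ++ [i]) v =
      if v = i then kpred k pref i + 1 else kpred k pref v := by
  by_cases hv : v = i
  · subst hv
    rw [if_pos rfl]
    by_cases hk : v + v = k
    · have hii : k - v = v := by omega
      simp only [kpred, if_pos hk]
      simp only [kpred, hii, if_pos hk] at h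
      rw [kcount_append_self]
      omega
    · simp only [kpred, if_neg hk]
      have hk2 : ¬ ((k - v) + (k - v) = k) := fun hh => hk (by omega)
      simp only [kpred, if_neg hk2] at h
      rw [show k - (k - v) = v from by ring] at h
      rw [kcount_append_self, kcount_append_ne pref v _ (fun hh => hk (by omega))]
      omega
  · rw [if_neg hv]
    by_cases hvc : v = k - i
    · subst hvc
      have hk : ¬ ((k - i) + (k - i) = k) := fun hh => hv (by omega)
      simp only [kpred, if_neg hk]
      simp only [kpred, if_neg hk] at h
      rw [show k - (k - i) = i from by ring] at h
      rw [kcount_append_ne pref i _ hv, show k - (k - i) = i from by ring, kcount_append_self]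
      omega
    · simp only [kpred]
      rw [kcount_append_ne pref i v hv, kcount_append_ne pref i (k - v) (fun hh => hvc (by omega))]

theorem kloopA_eq (k : Int) (xs : List Int) : ∀ pref d n, kInv k pref d →
    ksumLoopA k xs d n = n + kF k pref xs := by
  induction xs with
  | nil => intro pref d n _; simp [ksumLoopA, kF]
  | cons i rest ih =>
    intro pref d n hInv
    have hcomp := hInv (k - i)
    simp only [ksumLoopA]
    by_cases hp : kpred k pref (k - i) = 0
    · have hc : d.contains (k - i) = false := by
        rw [PySem.Dict.contains_eq_isSome_get?, hcomp, if_pos hp]; rfl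
      rw [if_neg (by simp [hc])]
      have hstep := kpred_append_unmatched k i pref hp
      by_cases hpi : kpred k pref i = 0
      · have hci : d.contains i = false := by
          rw [PySem.Dict.contains_eq_isSome_get?, hInv i, if_pos hpi]; rfl
        rw [if_neg (by simp [hci])]
        have hInv' : kInv k (pref ++ [i]) (d.insert i 1) := by
          intro v
          rw [PySem.Dict.get?_insert, hstep v]
          by_cases hvi : v = i
          · subst hvi
            rw [if_pos rfl, if_pos rfl, if_neg (by omega), hpi]
            norm_num
          · rw [if_neg hvi, if_neg hvi, hInv v]
        rw [ih (pref ++ [i]) _ n hInv']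
        simp only [kF, if_neg (show ¬ kpred k pref (k - i) ≠ 0 from by omega)]
        omega
      · have hci : d.contains i = true := by
          rw [PySem.Dict.contains_eq_isSome_get?, hInv i, if_neg hpi]; rfl
        rw [if_pos hci]
        have hgd : d.getD i 0 = ((kpred k pref i : Nat) : Int) := by
          rw [PySem.Dict.getD, hInv i, if_neg hpi]; rfl
        have hInv' : kInv k (pref ++ [i]) (PySem.Dict.modify d i 0 (fun x => x + 1)) := by
          intro v
          rw [PySem.Dict.modify, PySem.Dict.get?_insert, hstep v]
          by_cases hvi : v = i
          · subst hvi
            rw [if_pos rfl, if_pos rfl, if_neg (by omega), hgd]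
            have : ((kpred k pref v : Nat) : Int) + 1 = ((kpred k pref v + 1 : Nat) : Int) := by omega
            rw [this]
          · rw [if_neg hvi, if_neg hvi, hInv v]
        rw [ih (pref ++ [i]) _ n hInv']
        simp only [kF, if_neg (show ¬ kpred k pref (k - i) ≠ 0 from by omega)]
        omega
    · have hc : d.contains (k - i) = true := by
        rw [PySem.Dict.contains_eq_isSome_get?, hcomp, if_neg hp]; rfl
      rw [if_pos hc]
      have hgd : d.getD (k - i) 0 = ((kpred k pref (k - i) : Nat) : Int) := by
        rw [PySem.Dict.getD, hcomp, if_neg hp]; rfl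
      have hstep := kpred_append_matched k i pref hp
      have h1get : ∀ v, (PySem.Dict.modify d (k - i) 0 (fun x => x - 1)).get? v =
          if v = k - i then some (((kpred k pref (k - i) : Nat) : Int) - 1) else d.get? v := by
        intro v; rw [PySem.Dict.modify, PySem.Dict.get?_insert, hgd]
      have h1gd : (PySem.Dict.modify d (k - i) 0 (fun x => x - 1)).getD (k - i) 0 =
          ((kpred k pref (k - i) : Nat) : Int) - 1 := by
        rw [PySem.Dict.getD, h1get, if_pos rfl]; rfl
      by_cases hone : kpred k pref (k - i) = 1
      · rw [if_pos (by rw [h1gd, hone]; norm_num)]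
        have hInv' : kInv k (pref ++ [i])
            ((PySem.Dict.modify d (k - i) 0 (fun x => x - 1)).erase (k - i)) := by
          intro v
          rw [kget?_erase, hstep v]
          by_cases hvi : v = k - i
          · subst hvi
            rw [if_pos rfl, if_pos rfl, if_pos (by omega)]
          · rw [if_neg hvi, if_neg hvi, h1get v, if_neg hvi, hInv v]
        rw [ih (pref ++ [i]) _ (n + 1) hInv']
        simp only [kF, if_pos (show kpred k pref (k - i) ≠ 0 from hp)]
        omega
      · rw [if_neg (by rw [h1gd]; omega)]
        have hInv' : kInv k (pref ++ [i]) (PySem.Dict.modify d (k - i) 0 (fun x => x - 1)) := by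
          intro v
          rw [h1get v, hstep v]
          by_cases hvi : v = k - i
          · subst hvi
            rw [if_pos rfl, if_pos rfl, if_neg (by omega)]
            have : ((kpred k pref (k - i) - 1 : Nat) : Int) = ((kpred k pref (k - i) : Nat) : Int) - 1 := by omega
            rw [this]
          · rw [if_neg hvi, if_neg hvi, hInv v]
        rw [ih (pref ++ [i]) _ (n + 1) hInv']
        simp only [kF, if_pos (show kpred k pref (k - i) ≠ 0 from hp)]
        omega

theorem kS_eq_sum (k : Int) (l : List Int) (s : Finset Int) (hs : l.toFinset ⊆ s) :
    kS k l = ∑ v ∈ s, ((kpred k l v : Nat) : Int) := by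
  apply Finset.sum_subset hs
  intro v _ hv
  have : v ∉ l := fun h => hv (List.mem_toFinset.mpr h)
  simp [kpred_zero_of_not_mem k l v this]

theorem ksum_update (s : Finset Int) (f g : Int → Int) (u : Int) (hu : u ∈ s)
    (h : ∀ v ∈ s, v ≠ u → f v = g v) :
    ∑ v ∈ s, f v = (∑ v ∈ s, g v) + (f u - g u) := by
  rw [← Finset.add_sum_erase s f hu, ← Finset.add_sum_erase s g hu]
  have he : ∑ v ∈ s.erase u, f v = ∑ v ∈ s.erase u, g v :=
    Finset.sum_congr rfl (fun v hv => h v (Finset.mem_of_mem_erase hv) (Finset.ne_of_mem_erase hv))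
  rw [he]; ring

theorem ktoFinset_append (pref : List Int) (i : Int) :
    (pref ++ [i]).toFinset = insert i pref.toFinset := by
  rw [List.toFinset_append]
  rw [Finset.union_comm]
  simp

theorem kS_append_matched (k i : Int) (pref : List Int)
    (h : kpred k pref (k - i) ≠ 0) :
    kS k (pref ++ [i]) = kS k pref - 1 := by
  have hu : k - i ∈ pref := kmem_of_kpred_ne_zero _ _ _ h
  have h1 : (pref ++ [i]).toFinset = insert i pref.toFinset := ktoFinset_append pref i
  rw [kS_eq_sum k (pref ++ [i]) (insert i pref.toFinset) (le_of_eq h1),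
      kS_eq_sum k pref (insert i pref.toFinset) (fun x hx => Finset.mem_insert_of_mem hx)]
  rw [ksum_update (insert i pref.toFinset)
      (fun v => ((kpred k (pref ++ [i]) v : Nat) : Int))
      (fun v => ((kpred k pref v : Nat) : Int)) (k - i)
      (Finset.mem_insert_of_mem (List.mem_toFinset.mpr hu))
      (fun v _ hv => by simp only [kpred_append_matched k i pref h v, if_neg hv])]
  have hm := kpred_append_matched k i pref h (k - i)
  rw [if_pos rfl] at hm
  simp only [hm]
  have : ((kpred k pref (k - i) - 1 : Nat) : Int) - ((kpred k pref (k - i) : Nat) : Int) = -1 := by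
    omega
  rw [this]; ring

theorem kS_append_unmatched (k i : Int) (pref : List Int)
    (h : kpred k pref (k - i) = 0) :
    kS k (pref ++ [i]) = kS k pref + 1 := by
  have h1 : (pref ++ [i]).toFinset = insert i pref.toFinset := ktoFinset_append pref i
  rw [kS_eq_sum k (pref ++ [i]) (insert i pref.toFinset) (le_of_eq h1),
      kS_eq_sum k pref (insert i pref.toFinset) (fun x hx => Finset.mem_insert_of_mem hx)]
  rw [ksum_update (insert i pref.toFinset)
      (fun v => ((kpred k (pref ++ [i]) v : Nat) : Int))
      (fun v => ((kpred k pref v : Nat) : Int)) i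
      (Finset.mem_insert_self i pref.toFinset)
      (fun v _ hv => by simp only [kpred_append_unmatched k i pref h v, if_neg hv])]
  have hm := kpred_append_unmatched k i pref h i
  rw [if_pos rfl] at hm
  simp only [hm]
  have : ((kpred k pref i + 1 : Nat) : Int) - ((kpred k pref i : Nat) : Int) = 1 := by omega
  rw [this]

theorem kF_eq (k : Int) (xs : List Int) : ∀ pref : List Int,
    2 * kF k pref xs + kS k (pref ++ xs) = (xs.length : Int) + kS k pref := by
  induction xs with
  | nil => intro pref; simp [kF]
  | cons i rest ih =>
    intro pref
    have hx : pref ++ i :: rest = (pref ++ [i]) ++ rest := by simp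
    rw [hx]
    have hih := ih (pref ++ [i])
    simp only [kF, List.length_cons]
    by_cases hp : kpred k pref (k - i) = 0
    · rw [if_neg (show ¬ kpred k pref (k - i) ≠ 0 from by omega)]
      have hS := kS_append_unmatched k i pref hp
      push_cast
      omega
    · rw [if_pos (show kpred k pref (k - i) ≠ 0 from hp)]
      have hS := kS_append_matched k i pref hp
      push_cast
      omega

theorem kA_eq (nums : List Int) (k : Int) :
    2 * ksum_hash_1pass nums k = (nums.length : Int) - kS k nums := by
  have h0 : kInv k [] PySem.Dict.empty := by
    intro v
    rw [kpred_zero_of_not_mem k [] v (by simp), if_pos rfl, PySem.Dict.get?_empty]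
  have hA : ksumLoopA k nums PySem.Dict.empty 0 = 0 + kF k [] nums :=
    kloopA_eq k nums [] _ 0 h0
  have hF := kF_eq k nums []
  rw [List.nil_append] at hF
  have hS0 : kS k [] = 0 := by simp [kS]
  unfold ksum_hash_1pass
  omega

-- closed-form per-value contribution of B
def kG (k : Int) (nums : List Int) (v : Int) : Int :=
  if 2 * v = k then ((nums.count v / 2 : Nat) : Int)
  else if 2 * v < k then min ((nums.count v : Nat) : Int) ((nums.count (k - v) : Nat) : Int)
  else 0

theorem kB_sum (nums : List Int) (k : Int) :
    ksum_hash_1pass_alt nums k = ((PySem.Set.ofList nums).map (fun v => kG k nums v)).sum := by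
  unfold ksum_hash_1pass_alt
  simp only [PySem.Dict.foldl_insert_getD_add_one_eq_counter, PySem.Dict.items_counter,
    List.foldl_map]
  have hbody : ∀ (np v : Int),
      (if 2 * v = k then np + PySem.Int.floordiv ((nums.count v : Nat) : Int) 2
       else if 2 * v < k then
         np + min ((nums.count v : Nat) : Int) ((PySem.Dict.counter nums).getD (k - v) 0)
       else np) = np + kG k nums v := by
    intro np v
    rw [PySem.Dict.getD_counter]
    unfold kG
    split_ifs with h1 h2
    · rw [show PySem.Int.floordiv ((nums.count v : Nat) : Int) 2 =
            ((nums.count v / 2 : Nat) : Int) from by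
        exact_mod_cast PySem.Int.floordiv_natCast (nums.count v) 2]
    · rfl
    · omega
  have hfold : ∀ (l : List Int) (a : Int),
      List.foldl (fun np v =>
        if 2 * v = k then np + PySem.Int.floordiv ((nums.count v : Nat) : Int) 2
        else if 2 * v < k then
          np + min ((nums.count v : Nat) : Int) ((PySem.Dict.counter nums).getD (k - v) 0)
        else np) a l = List.foldl (fun np v => np + kG k nums v) a l := by
    intro l
    induction l with
    | nil => intro a; rfl
    | cons x xs ih => intro a; rw [List.foldl_cons, hbody]; exact ih _
  rw [hfold, PySem.List.foldl_add]
  simp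

theorem kofList_toFinset (nums : List Int) :
    (PySem.Set.ofList nums).toFinset = nums.toFinset := by
  ext x
  simp [PySem.Set.mem_ofList]

theorem kB_finset (nums : List Int) (k : Int) :
    ksum_hash_1pass_alt nums k = ∑ v ∈ nums.toFinset, kG k nums v := by
  rw [kB_sum, ← List.sum_toFinset _ (PySem.Set.nodup_ofList nums), kofList_toFinset]

theorem kG_zero_not_mem (nums : List Int) (k v : Int) (h : v ∉ nums) : kG k nums v = 0 := by
  have hc : nums.count v = 0 := List.count_eq_zero.mpr h
  unfold kG
  split_ifs with h1 h2
  · simp [hc]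
  · simp [hc]
  · rfl

theorem kcount_sum (nums : List Int) :
    ∑ v ∈ nums.toFinset, nums.count v = nums.length := by
  have h := Multiset.toFinset_sum_count_eq (nums : Multiset Int)
  simpa using h

theorem kinv_sum (nums : List Int) (k : Int) :
    ∑ v ∈ nums.toFinset ∪ nums.toFinset.image (fun v => k - v),
      (2 * kG k nums v + ((kpred k nums v : Nat) : Int) - ((nums.count v : Nat) : Int)) = 0 := by
  apply Finset.sum_involution (fun a _ => k - a)
  · intro a _
    unfold kG kpred
    rw [show k - (k - a) = a from by ring]
    split_ifs <;> omega
  · intro a _ hne heq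
    apply hne
    have h2 : 2 * a = k := by omega
    unfold kG kpred
    rw [if_pos h2, if_pos (by omega)]
    omega
  · intro a ha
    rcases Finset.mem_union.mp ha with h | h
    · exact Finset.mem_union_right _ (Finset.mem_image_of_mem _ h)
    · rcases Finset.mem_image.mp h with ⟨b, hb, rfl⟩
      rw [show k - (k - b) = b from by ring]
      exact Finset.mem_union_left _ hb
  · intro a _
    ring

theorem kB_eq (nums : List Int) (k : Int) :
    2 * ksum_hash_1pass_alt nums k = (nums.length : Int) - kS k nums := by
  have hzero : ∀ v ∈ nums.toFinset ∪ nums.toFinset.image (fun v => k - v),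
      v ∉ nums.toFinset →
      (2 * kG k nums v + ((kpred k nums v : Nat) : Int) - ((nums.count v : Nat) : Int)) = 0 := by
    intro v _ hv
    have hm : v ∉ nums := fun h => hv (List.mem_toFinset.mpr h)
    rw [kG_zero_not_mem nums k v hm, kpred_zero_of_not_mem k nums v hm,
        List.count_eq_zero.mpr hm]
    ring
  have hsub : nums.toFinset ⊆ nums.toFinset ∪ nums.toFinset.image (fun v => k - v) :=
    Finset.subset_union_left
  have hsum : ∑ v ∈ nums.toFinset,
      (2 * kG k nums v + ((kpred k nums v : Nat) : Int) - ((nums.count v : Nat) : Int)) = 0 := by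
    rw [Finset.sum_subset hsub hzero]
    exact kinv_sum nums k
  have hexp : ∑ v ∈ nums.toFinset,
      (2 * kG k nums v + ((kpred k nums v : Nat) : Int) - ((nums.count v : Nat) : Int)) =
      2 * (∑ v ∈ nums.toFinset, kG k nums v) + kS k nums
        - ∑ v ∈ nums.toFinset, ((nums.count v : Nat) : Int) := by
    rw [kS, Finset.mul_sum]
    rw [Finset.sum_sub_distrib, Finset.sum_add_distrib]
  have hcnt : ∑ v ∈ nums.toFinset, ((nums.count v : Nat) : Int) = (nums.length : Int) := by
    rw [← Nat.cast_sum, kcount_sum]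
  rw [kB_finset]
  rw [hexp, hcnt] at hsum
  omega

-- ===== VERDICT (by name: the statement is the Claim_ definition above) =====
theorem ksum_hash_1pass_spec : Claim_equal_ksum_hash_1pass := by
  intro nums k _
  unfold Spec_ksum_hash_1pass
  have hA := kA_eq nums k
  have hB := kB_eq nums k
  omega
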